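-- pv_equiv track=rewrite | github.com/jsjqian/Pseudo | token.py | form_lines
-- ===== SOURCE A (Python) =====
-- def form_lines(words):
--
--   ret = []
--   buffer = []
--
--   for word in words:
--     if word == "_NEWLINE":
--       line = buffer[:]
--       ret.append(line)
--       del buffer[:]
--     else:
--       buffer.append(word)
--
--   return ret
-- ===== SOURCE B (Python) =====
-- def form_lines(words):
--   ret = []
--   while "_NEWLINE" in words:
--     i = words.index("_NEWLINE")
--     ret.append(words[:i])
--     words = words[i+1:]
--   return ret
-- ===== Notes on version B (the rewrite author's own statement) =====
-- stated objective: simpler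
-- what changed: Replaces the single-pass buffer/flush loop with repeated search-and-slice: find the next '_NEWLINE' with list.index, append the slice before it, and continue on the slice after it; the trailing segment after the last delimiter is naturally never appended.
import Mathlib
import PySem

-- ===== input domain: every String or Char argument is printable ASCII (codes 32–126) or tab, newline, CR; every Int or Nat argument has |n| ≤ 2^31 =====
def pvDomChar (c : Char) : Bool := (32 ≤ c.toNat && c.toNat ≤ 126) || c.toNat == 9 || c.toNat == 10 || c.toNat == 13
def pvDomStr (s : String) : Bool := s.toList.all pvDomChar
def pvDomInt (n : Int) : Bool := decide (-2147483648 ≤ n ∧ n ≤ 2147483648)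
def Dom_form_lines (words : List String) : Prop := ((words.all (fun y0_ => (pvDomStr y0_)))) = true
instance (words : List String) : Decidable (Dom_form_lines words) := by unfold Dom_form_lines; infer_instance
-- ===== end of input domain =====

-- B changes the decomposition: repeated list.index search + slicing instead of A's
-- single-pass buffer/flush loop; same values, similar cost (objective: simpler).

-- ===== PORT A =====
-- A: one pass with accumulators ret and buffer; flush buffer on "_NEWLINE".
def form_lines (words : List String) : List (List String) :=
  (words.foldl
    (fun (s : List (List String) × List String) word =>
      if word == "_NEWLINE" then (s.1 ++ [s.2], []) else (s.1, s.2 ++ [word]))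
    ([], [])).1

-- ===== PORT B =====
-- B's loop: while "_NEWLINE" in words: i = words.index(...); ret.append(words[:i]); words = words[i+1:]
def formLinesAltLoop (words : List String) (ret : List (List String)) : List (List String) :=
  if h : "_NEWLINE" ∈ words then
    match hi : PySem.List.index? words "_NEWLINE" with
    | some i =>
        formLinesAltLoop (PySem.List.slice words (some ((i + 1 : Nat) : Int)) none)
          (ret ++ [PySem.List.slice words none (some ((i : Nat) : Int))])
    | none => ret  -- unreachable: "_NEWLINE" ∈ words
  else ret
termination_by words.length
decreasing_by
  have hne : words ≠ [] := by rintro rfl; simp at h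
  rw [PySem.List.slice_from_natCast]
  simp only [List.length_drop]
  have := List.length_pos_iff.mpr hne
  omega

def form_lines_alt (words : List String) : List (List String) :=
  formLinesAltLoop words []

-- ===== PRECONDITION & SPEC =====
def Spec_form_lines (words : List String) (out : List (List String)) : Prop := out = form_lines_alt words
instance (words : List String) (out : List (List String)) : Decidable (Spec_form_lines words out) := by unfold Spec_form_lines; infer_instance

-- ===== CLAIM (what is proved, stated in full; the proofs are below) =====
def Claim_equal_form_lines : Prop := ∀ (words : List String), Dom_form_lines words → Spec_form_lines words (form_lines words)

-- ===== LEMMAS AND PROOFS =====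

theorem formLinesAltLoop_no_nl (words : List String) (ret : List (List String))
    (h : "_NEWLINE" ∉ words) : formLinesAltLoop words ret = ret := by
  rw [formLinesAltLoop]
  simp [h]

theorem formLinesAltLoop_flush (buf t : List String) (ret : List (List String))
    (hb : "_NEWLINE" ∉ buf) :
    formLinesAltLoop (buf ++ "_NEWLINE" :: t) ret = formLinesAltLoop t (ret ++ [buf]) := by
  have hmem : "_NEWLINE" ∈ buf ++ "_NEWLINE" :: t := by simp
  have hidx : PySem.List.index? (buf ++ "_NEWLINE" :: t) "_NEWLINE" = some buf.length := by
    rw [PySem.List.index?_eq_some_iff]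
    exact ⟨buf, t, rfl, rfl, hb⟩
  rw [formLinesAltLoop]
  rw [dif_pos hmem]
  split
  · rename_i i hi
    rw [hidx] at hi
    injection hi with hi
    subst hi
    have h1 : PySem.List.slice (buf ++ "_NEWLINE" :: t) none (some ((buf.length : Nat) : Int)) = buf := by
      rw [PySem.List.slice_to_natCast]
      simpa using List.take_left buf ("_NEWLINE" :: t)
    have h2 : PySem.List.slice (buf ++ "_NEWLINE" :: t) (some ((buf.length + 1 : Nat) : Int)) none = t := by
      rw [PySem.List.slice_from_natCast]
      simp [List.drop_append]
    rw [h1, h2]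
  · rename_i hi
    rw [hidx] at hi
    exact (Option.some_ne_none _ hi).elim

theorem fold_eq_loop (ws : List String) :
    ∀ (ret : List (List String)) (buf : List String), "_NEWLINE" ∉ buf →
    (ws.foldl
      (fun (s : List (List String) × List String) word =>
        if word == "_NEWLINE" then (s.1 ++ [s.2], []) else (s.1, s.2 ++ [word]))
      (ret, buf)).1 = formLinesAltLoop (buf ++ ws) ret := by
  induction ws with
  | nil =>
    intro ret buf hb
    simp [formLinesAltLoop_no_nl _ _ (by simpa using hb)]
  | cons w t ih =>
    intro ret buf hb
    by_cases hw : w = "_NEWLINE"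
    · subst hw
      simp only [List.foldl_cons, beq_self_eq_true, if_true]
      rw [formLinesAltLoop_flush buf t ret hb]
      simpa using ih (ret ++ [buf]) [] (by simp)
    · simp only [List.foldl_cons, beq_iff_eq, if_neg hw]
      have hb' : "_NEWLINE" ∉ buf ++ [w] := by
        intro hm
        rcases List.mem_append.1 hm with h | h
        · exact hb h
        · simp at h; exact hw h.symm
      have := ih ret (buf ++ [w]) hb'
      simpa using this

-- ===== VERDICT (by name: the statement is the Claim_ definition above) =====
theorem form_lines_spec : Claim_equal_form_lines := by
  intro words _
  unfold Spec_form_lines form_lines form_lines_alt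
  simpa using fold_eq_loop words [] [] (by simp)
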